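-- pv_equiv track=rewrite | github.com/Tiongss1824/Discrete-Maths-Assignment | Assq1a.py | min_prime_factor
-- ===== SOURCE A (Python) =====
-- def min_prime_factor(n):
--     result = [0]*(n+1)
--     result[0] = [0,0]
--     result[1] = [0,0]
--     for x in range(2, n + 1):
--         if result[x] == 0:
--             for y in range(x, n + 1, x):
--                 if result[y] == 0:
--
--                     power = 1
--                     while y % x**(power +1) == 0:
--                         power += 1
--
--                     result[y] = [x, power]
--     return result
-- ===== SOURCE B (Python) =====
-- def min_prime_factor(n):
--     result = [[0, 0], [0, 0]]
--     for y in range(2, n + 1):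
--         d = 2
--         while d * d <= y and y % d:
--             d += 1
--         if y % d:
--             d = y
--         e, m = 0, y
--         while m % d == 0:
--             e += 1
--             m //= d
--         result.append([d, e])
--     return result
-- ===== Notes on version B (the rewrite author's own statement) =====
-- stated objective: alternative
-- what changed: Replaces the Eratosthenes-style sieve that marks multiples of each prime in a shared array with an independent per-number factorization: for each y it finds the smallest divisor by trial division up to sqrt(y) and counts its exponent by repeated division, appending rows in order.
-- outside the precondition, e.g. on min_prime_factor(0): A raises IndexError, B returns [[0, 0], [0, 0]]
import Mathlib
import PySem

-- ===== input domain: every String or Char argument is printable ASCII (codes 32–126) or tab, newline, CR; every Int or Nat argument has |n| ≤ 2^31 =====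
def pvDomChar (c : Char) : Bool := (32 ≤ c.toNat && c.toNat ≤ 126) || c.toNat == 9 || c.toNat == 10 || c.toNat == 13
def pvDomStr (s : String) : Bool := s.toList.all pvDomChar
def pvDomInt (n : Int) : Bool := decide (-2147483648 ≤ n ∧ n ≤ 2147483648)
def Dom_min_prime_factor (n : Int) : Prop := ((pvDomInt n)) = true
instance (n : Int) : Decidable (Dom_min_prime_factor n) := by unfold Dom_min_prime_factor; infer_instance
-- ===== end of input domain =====

-- B replaces A's shared-array sieve (marking multiples of each prime) by an independent
-- per-number trial-division factorization; alternative algorithm of similar size, not faster.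

-- ===== PORT A =====
-- `power = 1; while y % x**(power+1) == 0: power += 1` — fuel-bounded while loop
-- (fuel y.natAbs suffices; the exponent is < y). Exponent (power+1) is nonneg here,
-- so `x ** (power+1)` is exactly `x ^ (power+1).toNat`.
def pvPowLoop (y x : Int) (power : Int) : Nat → Int
  | 0 => power
  | fuel+1 =>
      if PySem.Int.mod y (x ^ (power + 1).toNat) = 0 then pvPowLoop y x (power + 1) fuel
      else power

-- cells are `Option (List Int)`: `none` is Python's sentinel 0, `some row` a written row.
-- `result[y]` reads/writes at index y, which is in range for 0 ≤ y ≤ n (guaranteed by Pre_),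
-- so `List.getD y.toNat` / `List.set y.toNat` are exact here.
def pvInner (x : Int) (cells : List (Option (List Int))) (y : Int) :
    List (Option (List Int)) :=
  if cells.getD y.toNat none = none then
    cells.set y.toNat (some [x, pvPowLoop y x 1 y.natAbs])
  else cells

def pvOuter (n : Int) (cells : List (Option (List Int))) (x : Int) :
    List (Option (List Int)) :=
  if cells.getD x.toNat none = none then
    (PySem.List.pyRange x (n + 1) x).foldl (pvInner x) cells
  else cells

def min_prime_factor (n : Int) : List (List Int) :=
  let cells : List (Option (List Int)) := List.replicate (n + 1).toNat none
  let cells := cells.set 0 (some [0, 0])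
  let cells := cells.set 1 (some [0, 0])
  -- Python raises IndexError on the two `result[_] = _` lines when n < 1; Pre_ excludes that.
  (((PySem.List.pyRange 2 (n + 1) 1).foldl (pvOuter n) cells).map (fun o => o.getD []))

-- ===== PORT B =====
-- `d = 2; while d*d <= y and y % d: d += 1` — fuel-bounded (fuel y.natAbs suffices).
def pvDivLoop (y : Int) (d : Int) : Nat → Int
  | 0 => d
  | fuel+1 =>
      if d * d ≤ y ∧ PySem.Int.mod y d ≠ 0 then pvDivLoop y (d + 1) fuel
      else d

-- `e, m = 0, y; while m % d == 0: e += 1; m //= d` — fuel-bounded (fuel y.natAbs suffices).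
def pvExpLoop (d : Int) (e m : Int) : Nat → Int × Int
  | 0 => (e, m)
  | fuel+1 =>
      if PySem.Int.mod m d = 0 then pvExpLoop d (e + 1) (PySem.Int.floordiv m d) fuel
      else (e, m)

def min_prime_factor_alt (n : Int) : List (List Int) :=
  (PySem.List.pyRange 2 (n + 1) 1).foldl
    (fun result y =>
      let d0 := pvDivLoop y 2 y.natAbs
      let d := if PySem.Int.mod y d0 ≠ 0 then y else d0
      let em := pvExpLoop d 0 y y.natAbs
      result ++ [[d, em.1]])
    [[0, 0], [0, 0]]

-- ===== PRECONDITION & SPEC =====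
-- Pre_ excludes exactly n ≤ 0, where Python A raises IndexError on `result[0]=[0,0]` / `result[1]=[0,0]`.
def Pre_min_prime_factor (n : Int) : Prop := 1 ≤ n
instance (n : Int) : Decidable (Pre_min_prime_factor n) := by unfold Pre_min_prime_factor; infer_instance
def pvWitness_min_prime_factor : Int := (12)

def Spec_min_prime_factor (n : Int) (out : List (List Int)) : Prop := out = min_prime_factor_alt n
instance (n : Int) (out : List (List Int)) : Decidable (Spec_min_prime_factor n out) := by unfold Spec_min_prime_factor; infer_instance

-- ===== CLAIM (what is proved, stated in full; the proofs are below) =====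
def Claim_equal_min_prime_factor : Prop := ∀ (n : Int), Dom_min_prime_factor n → Pre_min_prime_factor n → Spec_min_prime_factor n (min_prime_factor n)

-- ===== LEMMAS AND PROOFS =====

-- The common reference value: row m = [minFac m, multiplicity of minFac m in m].
def pvRow (m : Nat) : List Int := [(m.minFac : Int), ((m.factorization m.minFac : Nat) : Int)]

def pvRef (n : Int) : List (List Int) :=
  [0, 0] :: [0, 0] :: (PySem.List.pyRange 2 (n + 1) 1).map (fun y => pvRow y.toNat)

theorem divLoop_minFac (m : Nat) (hm : 2 ≤ m) :
    ∀ (fuel d : Nat), 2 ≤ d → d ≤ m.minFac → m ≤ d + fuel →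
    (if PySem.Int.mod (m : Int) (pvDivLoop (m : Int) (d : Int) fuel) ≠ 0 then (m : Int)
     else pvDivLoop (m : Int) (d : Int) fuel) = (m.minFac : Int) := by
  intro fuel
  induction fuel with
  | zero =>
    intro d hd2 hdm hfuel
    have h1 : m.minFac ≤ m := Nat.minFac_le (by omega)
    have hdm' : d = m := by omega
    have h2 : m.minFac = d := by omega
    have hmod : PySem.Int.mod (m : Int) (d : Int) = 0 := by
      simp [PySem.Int.mod_natCast, hdm', Nat.mod_self]
    simp [pvDivLoop, hmod, h2]
  | succ fuel ih =>
    intro d hd2 hdm hfuel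
    by_cases hc : (d : Int) * d ≤ (m : Int) ∧ PySem.Int.mod (m : Int) (d : Int) ≠ 0
    · have hndvd : ¬ d ∣ m := by
        intro hdvd
        have h := Nat.mod_eq_zero_of_dvd hdvd
        simp [PySem.Int.mod_natCast, h] at hc
      have hlt : d < m.minFac := by
        rcases Nat.lt_or_ge d m.minFac with h | h
        · exact h
        · exact absurd (by rw [show d = m.minFac by omega]; exact Nat.minFac_dvd m) hndvd
      have hstep : pvDivLoop (m : Int) (d : Int) (fuel+1) = pvDivLoop (m : Int) ((d : Int)+1) fuel := by
        simp only [pvDivLoop, if_pos hc]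
      rw [hstep, show ((d : Int)+1) = ((d+1 : Nat) : Int) by push_cast; ring]
      exact ih (d+1) (by omega) (by omega) (by omega)
    · have heq : pvDivLoop (m : Int) (d : Int) (fuel+1) = (d : Int) := by
        simp only [pvDivLoop, if_neg hc]
      rw [heq]
      by_cases hdvd : d ∣ m
      · have h0 : PySem.Int.mod (m : Int) (d : Int) = 0 := by
          simp [PySem.Int.mod_natCast, Nat.mod_eq_zero_of_dvd hdvd]
        have hle : m.minFac ≤ d := Nat.minFac_le_of_dvd hd2 hdvd
        simp [h0, show m.minFac = d by omega]
      · have h0 : PySem.Int.mod (m : Int) (d : Int) ≠ 0 := by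
          simp only [PySem.Int.mod_natCast]
          exact_mod_cast fun h => hdvd (Nat.dvd_of_mod_eq_zero (by exact_mod_cast h))
        have hm2 : m < d * d := by
          rcases not_and_or.mp hc with h | h
          · have := lt_of_not_ge h
            exact_mod_cast this
          · exact absurd h0 (by simpa using h)
        have hprime : m.Prime := by
          by_contra hnp
          have hsq := Nat.minFac_sq_le_self (show 0 < m by omega) hnp
          have hsq' : m.minFac * m.minFac ≤ m := by nlinarith [hsq]
          nlinarith [hdm]
        rw [if_pos h0, hprime.minFac_eq]

theorem expLoop_fact (p : Nat) (hp : p.Prime) :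
    ∀ (fuel m e : Nat), 1 ≤ m → m ≤ fuel →
    (pvExpLoop (p : Int) (e : Int) (m : Int) fuel).1 = ((e + m.factorization p : Nat) : Int) := by
  intro fuel
  induction fuel with
  | zero => intro m e h1 h2; omega
  | succ fuel ih =>
    intro m e h1 h2
    by_cases hdvd : p ∣ m
    · have hmod : PySem.Int.mod (m : Int) (p : Int) = 0 := by
        simp [PySem.Int.mod_natCast, Nat.mod_eq_zero_of_dvd hdvd]
      have hstep : (pvExpLoop (p:Int) (e:Int) (m:Int) (fuel+1)) =
          pvExpLoop (p:Int) ((e:Int)+1) (PySem.Int.floordiv (m:Int) (p:Int)) fuel := by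
        simp only [pvExpLoop, if_pos hmod]
      have hpm : p ≤ m := Nat.le_of_dvd (by omega) hdvd
      have hdiv : PySem.Int.floordiv (m:Int) (p:Int) = ((m / p : Nat) : Int) :=
        PySem.Int.floordiv_natCast m p
      have hlt : m / p < m := Nat.div_lt_self (by omega) hp.one_lt
      have h1' : 1 ≤ m / p := (Nat.one_le_div_iff hp.pos).mpr hpm
      have hfle : m / p ≤ fuel := Nat.le_of_lt_succ (lt_of_lt_of_le hlt h2)
      rw [hstep, hdiv, show ((e:Int)+1) = ((e+1 : Nat) : Int) by push_cast; ring,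
        ih (m/p) (e+1) h1' hfle]
      have hfac : (m / p).factorization p = m.factorization p - 1 := by
        rw [Nat.factorization_div hdvd]
        simp [hp.factorization]
      have hpos : 1 ≤ m.factorization p := (hp.factorization_pos_of_dvd (by omega) hdvd)
      congr 1
      omega
    · have hmod : PySem.Int.mod (m : Int) (p : Int) ≠ 0 := by
        simp only [PySem.Int.mod_natCast]
        exact_mod_cast fun h => hdvd (Nat.dvd_of_mod_eq_zero (by exact_mod_cast h))
      have hfac : m.factorization p = 0 := Nat.factorization_eq_zero_of_not_dvd hdvd
      have hstep : pvExpLoop (p:Int) (e:Int) (m:Int) (fuel+1) = ((e:Int), (m:Int)) := by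
        simp only [pvExpLoop, if_neg hmod]
      rw [hstep]; simp [hfac]

theorem powLoop_fact (p m : Nat) (hp : p.Prime) (hm : 1 ≤ m) :
    ∀ (fuel w : Nat), w ≤ m.factorization p → m.factorization p ≤ w + fuel →
    pvPowLoop (m : Int) (p : Int) (w : Int) fuel = (m.factorization p : Int) := by
  intro fuel
  induction fuel with
  | zero => intro w h1 h2; simp only [pvPowLoop]; congr 1; omega
  | succ fuel ih =>
    intro w h1 h2
    have htn : ((w : Int) + 1).toNat = w + 1 := by omega
    have hcond : (PySem.Int.mod (m:Int) ((p:Int) ^ ((w:Int)+1).toNat) = 0) ↔ p ^ (w+1) ∣ m := by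
      rw [htn, show ((p:Int) ^ (w+1)) = ((p ^ (w+1) : Nat) : Int) by push_cast; ring,
        PySem.Int.mod_natCast]
      constructor
      · intro h; exact Nat.dvd_of_mod_eq_zero (by exact_mod_cast h)
      · intro h; exact_mod_cast congrArg (Nat.cast : Nat → Int) (Nat.mod_eq_zero_of_dvd h)
    by_cases hdvd : p ^ (w+1) ∣ m
    · have hle : w + 1 ≤ m.factorization p :=
        (Nat.Prime.pow_dvd_iff_le_factorization hp (by omega)).mp hdvd
      have hstep : pvPowLoop (m:Int) (p:Int) (w:Int) (fuel+1) =
          pvPowLoop (m:Int) (p:Int) ((w:Int)+1) fuel := by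
        simp only [pvPowLoop, if_pos (hcond.mpr hdvd)]
      rw [hstep, show ((w:Int)+1) = ((w+1:Nat):Int) by push_cast; ring]
      exact ih (w+1) hle (by omega)
    · have hgt : m.factorization p ≤ w := by
        by_contra hlt
        exact hdvd ((Nat.Prime.pow_dvd_iff_le_factorization hp (by omega)).mpr (by omega))
      have : pvPowLoop (m:Int) (p:Int) (w:Int) (fuel+1) = (w:Int) := by
        simp only [pvPowLoop, if_neg (fun h => hdvd (hcond.mp h))]
      rw [this]; congr 1; omega

theorem row_eq (y : Int) (hy2 : 2 ≤ y) :
    (let d0 := pvDivLoop y 2 y.natAbs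
     let d := if PySem.Int.mod y d0 ≠ 0 then y else d0
     let em := pvExpLoop d 0 y y.natAbs
     [d, em.1]) = pvRow y.toNat := by
  obtain ⟨m, rfl⟩ : ∃ m : Nat, y = (m : Int) := ⟨y.toNat, by omega⟩
  have hm : 2 ≤ m := by exact_mod_cast hy2
  have hmf2 : 2 ≤ m.minFac := (Nat.minFac_prime (by omega)).two_le
  have hmfle : m.minFac ≤ m := Nat.minFac_le (by omega)
  have hprime : m.minFac.Prime := Nat.minFac_prime (by omega)
  have hnat : ((m:Int)).natAbs = m := Int.natAbs_natCast m
  have hd := divLoop_minFac m hm m 2 (by omega) hmf2 (by omega)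
  dsimp only
  rw [hnat, Int.toNat_natCast]
  rw [show ((2:Int)) = ((2:Nat):Int) by norm_num] 
  rw [hd]
  rw [show ((0:Int)) = ((0:Nat):Int) by norm_num]
  rw [expLoop_fact m.minFac hprime m m 0 (by omega) (le_refl m)]
  simp [pvRow]

theorem alt_eq_ref (n : Int) (_hn : 1 ≤ n) : min_prime_factor_alt n = pvRef n := by
  have hfold : ∀ (L : List Int), (∀ y ∈ L, 2 ≤ y) → ∀ (init : List (List Int)),
      L.foldl (fun result y =>
        let d0 := pvDivLoop y 2 y.natAbs
        let d := if PySem.Int.mod y d0 ≠ 0 then y else d0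
        let em := pvExpLoop d 0 y y.natAbs
        result ++ [[d, em.1]]) init = init ++ L.map (fun y => pvRow y.toNat) := by
    intro L
    induction L with
    | nil => intro _ init; simp
    | cons y L ih =>
      intro hmem init
      have hy2 : 2 ≤ y := hmem y (by simp)
      simp only [List.foldl_cons, List.map_cons]
      rw [ih (fun z hz => hmem z (by simp [hz]))]
      have := row_eq y hy2
      dsimp only at this ⊢
      rw [this]
      simp
  unfold min_prime_factor_alt pvRef
  rw [hfold _ (fun y hy => (PySem.List.mem_pyRange_one.mp hy).1)]
  simp

def pvF (k i : Nat) : Option (List Int) :=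
  if i < 2 then some [0, 0] else if i.minFac ≤ k then some (pvRow i) else none

theorem getD_set_lt {α : Type} (l : List α) (j : Nat) (a d : α) (i : Nat) (hj : j < l.length) :
    (l.set j a).getD i d = if i = j then a else l.getD i d := by
  by_cases h : i = j
  · subst h; simp [List.getD, List.getElem?_set_self hj]
  · simp [List.getD, List.getElem?_set_ne (fun hh => h hh.symm), h]

theorem pvInner_foldl (x N : Nat) (hxp : Nat.Prime x) :
    ∀ (L : List Int), (∀ y ∈ L, ∃ m : Nat, y = (m : Int) ∧ x ≤ m ∧ m ≤ N ∧ x ∣ m) →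
    ∀ (G : Nat → Option (List Int)) (cells : List (Option (List Int))),
    cells.length = N + 1 → (∀ i, i ≤ N → cells.getD i none = G i) →
    (L.foldl (pvInner (x : Int)) cells).length = N + 1 ∧
    ∀ i, i ≤ N → (L.foldl (pvInner (x : Int)) cells).getD i none =
      if ((i : Int) ∈ L ∧ G i = none) then some [(x : Int), (i.factorization x : Int)] else G i := by
  intro L
  induction L with
  | nil => intro _ G cells hlen hinv; simpa using ⟨hlen, fun i hi => hinv i hi⟩
  | cons y L ih =>
    intro hmem G cells hlen hinv
    obtain ⟨m, rfl, hxm, hmN, hdvd⟩ := hmem y (by simp)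
    have hm1 : 1 ≤ m := le_trans hxp.one_lt.le hxm
    have hmlt : m < cells.length := by omega
    have hGm : cells.getD m none = G m := hinv m hmN
    simp only [List.foldl_cons]
    by_cases hnone : G m = none
    · have hstep : pvInner (x : Int) cells (m : Int) =
          cells.set m (some [(x : Int), (m.factorization x : Int)]) := by
        unfold pvInner
        rw [Int.toNat_natCast, hGm, if_pos hnone, Int.natAbs_natCast,
          show ((1:Int)) = ((1:Nat):Int) by norm_num,
          powLoop_fact x m hxp hm1 m 1
            (hxp.factorization_pos_of_dvd (by omega) hdvd)
            (by have := Nat.factorization_lt (p := x) (show m ≠ 0 by omega); omega)]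
      rw [hstep]
      have hlen' : (cells.set m (some [(x : Int), (m.factorization x : Int)])).length = N + 1 := by
        simpa using hlen
      obtain ⟨rl, rinv⟩ := ih (fun z hz => by
          obtain ⟨m', h⟩ := hmem z (by simp [hz]); exact ⟨m', h⟩)
        (fun i => if i = m then some [(x : Int), (m.factorization x : Int)] else G i)
        _ hlen'
        (fun i hi => by
          rw [getD_set_lt cells m _ none i hmlt, hinv i hi])
      refine ⟨rl, fun i hi => ?_⟩
      rw [rinv i hi]
      by_cases him : i = m
      · subst him
        simp [hnone]
      · have hne : ((i : Int)) ≠ ((m : Int)) := by exact_mod_cast him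
        simp only [if_neg him, List.mem_cons, hne, false_or]
    · have hstep : pvInner (x : Int) cells (m : Int) = cells := by
        unfold pvInner
        rw [Int.toNat_natCast, hGm, if_neg hnone]
      rw [hstep]
      obtain ⟨rl, rinv⟩ := ih (fun z hz => by
          obtain ⟨m', h⟩ := hmem z (by simp [hz]); exact ⟨m', h⟩) G cells hlen hinv
      refine ⟨rl, fun i hi => ?_⟩
      rw [rinv i hi]
      by_cases him : i = m
      · subst him; simp [hnone]
      · have hne : ((i : Int)) ≠ ((m : Int)) := by exact_mod_cast him
        simp only [List.mem_cons, hne, false_or]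

theorem pvOuter_step (N k : Nat) (hk : 1 ≤ k) (hkN : k + 1 ≤ N)
    (cells : List (Option (List Int)))
    (hlen : cells.length = N + 1) (hinv : ∀ i, i ≤ N → cells.getD i none = pvF k i) :
    (pvOuter (N : Int) cells ((k+1 : Nat) : Int)).length = N + 1 ∧
    ∀ i, i ≤ N → (pvOuter (N : Int) cells ((k+1 : Nat) : Int)).getD i none = pvF (k+1) i := by
  have hx2 : 2 ≤ k + 1 := by omega
  have hcell : cells.getD (k+1) none = pvF k (k+1) := hinv (k+1) hkN
  by_cases hp : (k+1).Prime
  · -- prime: the cell is still none, the inner loop marks all multiples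
    have hmf : (k+1).minFac = k+1 := hp.minFac_eq
    have hnone : pvF k (k+1) = none := by
      unfold pvF
      rw [if_neg (by omega), if_neg (by omega)]
    have hopen : pvOuter (N : Int) cells ((k+1 : Nat) : Int) =
        (PySem.List.pyRange ((k+1:Nat) : Int) ((N:Int) + 1) ((k+1:Nat) : Int)).foldl
          (pvInner ((k+1:Nat) : Int)) cells := by
      unfold pvOuter
      rw [Int.toNat_natCast, hcell, hnone, if_pos rfl]
    have hmem : ∀ y ∈ PySem.List.pyRange ((k+1:Nat) : Int) ((N:Int) + 1) ((k+1:Nat) : Int),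
        ∃ m : Nat, y = (m : Int) ∧ k+1 ≤ m ∧ m ≤ N ∧ (k+1) ∣ m := by
      intro y hy
      rw [PySem.List.mem_pyRange_iff_of_pos (by positivity)] at hy
      obtain ⟨h1, h2, h3⟩ := hy
      refine ⟨y.toNat, by omega, by omega, by omega, ?_⟩
      have hdy : ((k+1:Nat) : Int) ∣ y := by
        have := dvd_add h3 (dvd_refl ((k+1:Nat) : Int)); simpa using this
      have : ((k+1:Nat) : Int) ∣ ((y.toNat : Nat) : Int) := by
        rwa [show ((y.toNat : Nat) : Int) = y by omega]
      exact_mod_cast this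
    obtain ⟨rl, rinv⟩ := pvInner_foldl (k+1) N hp _ hmem (pvF k) cells hlen hinv
    rw [hopen]
    refine ⟨rl, fun i hi => ?_⟩
    rw [rinv i hi]
    have hiff : (((i : Int) ∈ PySem.List.pyRange ((k+1:Nat) : Int) ((N:Int) + 1) ((k+1:Nat) : Int))
        ∧ pvF k i = none) ↔ (2 ≤ i ∧ i.minFac = k+1) := by
      constructor
      · rintro ⟨hmemi, hnonei⟩
        rw [PySem.List.mem_pyRange_iff_of_pos (by positivity)] at hmemi
        obtain ⟨h1, h2, h3⟩ := hmemi
        have hki : k + 1 ≤ i := by exact_mod_cast h1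
        have hdvd : (k+1) ∣ i := by
          have hdy : ((k+1:Nat) : Int) ∣ (i : Int) := by
            have := dvd_add h3 (dvd_refl ((k+1:Nat) : Int)); simpa using this
          exact_mod_cast hdy
        have hle : i.minFac ≤ k+1 := Nat.minFac_le_of_dvd hx2 hdvd
        have hge : ¬ i.minFac ≤ k := by
          unfold pvF at hnonei
          rw [if_neg (by omega)] at hnonei
          by_contra hc
          rw [if_pos hc] at hnonei
          simp at hnonei
        exact ⟨by omega, by omega⟩
      · rintro ⟨hi2, hmfi⟩
        have hdvd : (k+1) ∣ i := hmfi ▸ Nat.minFac_dvd i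
        have hki : k+1 ≤ i := hmfi ▸ Nat.minFac_le (by omega)
        refine ⟨?_, ?_⟩
        · rw [PySem.List.mem_pyRange_iff_of_pos (by positivity)]
          refine ⟨by exact_mod_cast hki, by omega, ?_⟩
          have : ((k+1:Nat) : Int) ∣ (i : Int) := by exact_mod_cast hdvd
          exact dvd_sub this dvd_rfl
        · unfold pvF
          rw [if_neg (by omega), if_neg (by omega)]
    by_cases hcond : 2 ≤ i ∧ i.minFac = k+1
    · rw [if_pos (hiff.mpr hcond)]
      unfold pvF
      rw [if_neg (by omega), if_pos (by omega)]
      unfold pvRow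
      rw [hcond.2]
    · rw [if_neg (fun h => hcond (hiff.mp h))]
      unfold pvF
      by_cases hi2 : i < 2
      · rw [if_pos hi2, if_pos hi2]
      · rw [if_neg hi2, if_neg hi2]
        have hne : i.minFac ≠ k+1 := fun h => hcond ⟨by omega, h⟩
        by_cases hle : i.minFac ≤ k
        · rw [if_pos hle, if_pos (by omega)]
        · rw [if_neg hle, if_neg (by omega)]
  · -- composite: the cell is already filled, A skips; pvF (k+1) = pvF k
    have hmfne : (k+1).minFac ≠ k+1 := fun h => hp (Nat.prime_def_minFac.mpr ⟨hx2, h⟩)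
    have hmfle : (k+1).minFac ≤ k+1 := Nat.minFac_le (by omega)
    have hsome : pvF k (k+1) = some (pvRow (k+1)) := by
      unfold pvF
      rw [if_neg (by omega), if_pos (by omega)]
    have hskip : pvOuter (N : Int) cells ((k+1 : Nat) : Int) = cells := by
      unfold pvOuter
      rw [Int.toNat_natCast, hcell, hsome]
      simp
    rw [hskip]
    refine ⟨hlen, fun i hi => ?_⟩
    rw [hinv i hi]
    unfold pvF
    by_cases hi2 : i < 2
    · rw [if_pos hi2, if_pos hi2]
    · rw [if_neg hi2, if_neg hi2]
      have hne : i.minFac ≠ k+1 := by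
        intro h
        exact hp (h ▸ Nat.minFac_prime (show i ≠ 1 by omega))
      by_cases hle : i.minFac ≤ k
      · rw [if_pos hle, if_pos (by omega)]
      · rw [if_neg hle, if_neg (by omega)]

theorem pvOuter_fold (N : Nat) (_hN : 1 ≤ N)
    (cells0 : List (Option (List Int)))
    (hlen : cells0.length = N + 1) (hinv : ∀ i, i ≤ N → cells0.getD i none = pvF 1 i) :
    ∀ (t : Nat), 1 + t ≤ N →
    ((PySem.List.pyRange 2 (((1+t : Nat) : Int) + 1) 1).foldl (pvOuter (N : Int)) cells0).length = N + 1 ∧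
    ∀ i, i ≤ N → ((PySem.List.pyRange 2 (((1+t : Nat) : Int) + 1) 1).foldl (pvOuter (N : Int)) cells0).getD i none = pvF (1+t) i := by
  intro t
  induction t with
  | zero =>
    intro _
    rw [show (((1+0 : Nat) : Int) + 1) = (2 : Int) by norm_num,
      PySem.List.pyRange_one_eq_nil (le_refl (2 : Int))]
    exact ⟨hlen, hinv⟩
  | succ t ih =>
    intro ht
    obtain ⟨rl, rinv⟩ := ih (by omega)
    have hsplit : PySem.List.pyRange 2 (((1+(t+1) : Nat) : Int) + 1) 1 =
        PySem.List.pyRange 2 (((1+t : Nat) : Int) + 1) 1 ++ [(((1+t)+1 : Nat) : Int)] := by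
      rw [show ((((1+t)+1 : Nat) : Int)) = (((1+t : Nat) : Int) + 1) by push_cast; ring]
      rw [show (((1+(t+1) : Nat) : Int) + 1) = (((1+t : Nat) : Int) + 1) + 1 by push_cast; ring]
      exact PySem.List.pyRange_one_succ_right (by push_cast; omega)
    rw [hsplit, List.foldl_append]
    simp only [List.foldl_cons, List.foldl_nil]
    obtain ⟨sl, sinv⟩ := pvOuter_step N (1+t) (by omega) (by omega) _ rl rinv
    exact ⟨sl, fun i hi => by rw [sinv i hi, show 1+(t+1) = (1+t)+1 by omega]⟩

theorem a_eq_ref (n : Int) (hn : 1 ≤ n) : min_prime_factor n = pvRef n := by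
  obtain ⟨N, rfl⟩ : ∃ N : Nat, n = (N : Int) := ⟨n.toNat, by omega⟩
  have hN : 1 ≤ N := by exact_mod_cast hn
  unfold min_prime_factor
  set cells0 : List (Option (List Int)) :=
    ((List.replicate (((N:Int) + 1).toNat) none).set 0 (some [0, 0])).set 1 (some [0, 0]) with hc0
  have htn : ((N:Int) + 1).toNat = N + 1 := by omega
  have hlen0 : cells0.length = N + 1 := by
    rw [hc0]; simp only [List.length_set, List.length_replicate, htn]
  have hinv0 : ∀ i, i ≤ N → cells0.getD i none = pvF 1 i := by
    intro i hi
    have hlen' : ((List.replicate (((N:Int) + 1).toNat) (none : Option (List Int))).set 0 (some [0, 0])).length = N + 1 := by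
      simp only [List.length_set, List.length_replicate, htn]
    have hlenr : (List.replicate (((N:Int) + 1).toNat) (none : Option (List Int))).length = N + 1 := by
      simp only [List.length_replicate, htn]
    unfold pvF
    rcases Nat.lt_or_ge i 2 with hi2 | hi2
    · interval_cases i
      · rw [hc0, getD_set_lt _ 1 _ none 0 (by omega),
          getD_set_lt _ 0 _ none 0 (by omega)]
        simp
      · rw [hc0, getD_set_lt _ 1 _ none 1 (by omega)]
        simp
    · have hmf2 : 2 ≤ i.minFac := (Nat.minFac_prime (by omega)).two_le
      rw [if_neg (by omega), if_neg (by omega), hc0,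
        getD_set_lt _ 1 _ none i (by omega),
        getD_set_lt _ 0 _ none i (by omega),
        if_neg (by omega), if_neg (by omega)]
      simp [List.getD, htn]
  obtain ⟨FL, FI⟩ := pvOuter_fold N hN cells0 hlen0 hinv0 (N - 1) (by omega)
  have hNt : ((1 + (N-1) : Nat) : Int) = (N : Int) := by push_cast; omega
  rw [hNt] at FL FI
  have hft : 1 + (N - 1) = N := by omega
  rw [hft] at FI
  rw [pvRef]
  apply List.ext_getElem
  · rw [List.length_map, FL, List.length_cons, List.length_cons, List.length_map,
      PySem.List.length_pyRange_one]
    omega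
  · intro i h1 h2
    rw [List.length_map, FL] at h1
    have hiN : i ≤ N := by omega
    have hival : (((PySem.List.pyRange 2 ((N:Int) + 1) 1).foldl (pvOuter (N:Int)) cells0))[i]? =
        some (pvF N i) := by
      have hFi := FI i hiN
      rw [List.getD] at hFi
      rcases hx : ((PySem.List.pyRange 2 ((N:Int) + 1) 1).foldl (pvOuter (N:Int)) cells0)[i]? with _ | v
      · rw [List.getElem?_eq_none_iff] at hx
        omega
      · rw [hx] at hFi
        simp at hFi
        rw [hFi]
    rw [List.getElem_map]
    have hcell : ((PySem.List.pyRange 2 ((N:Int) + 1) 1).foldl (pvOuter (N:Int)) cells0)[i] = pvF N i := by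
      have h' := hival
      rw [List.getElem?_eq_getElem (show i < ((PySem.List.pyRange 2 ((N:Int) + 1) 1).foldl (pvOuter (N:Int)) cells0).length by omega)] at h'
      exact Option.some.inj h'
    rw [hcell]
    unfold pvF
    rcases Nat.lt_or_ge i 2 with hi2 | hi2
    · interval_cases i <;> simp
    · have hle : i.minFac ≤ N := le_trans (Nat.minFac_le (by omega)) hiN
      rw [if_neg (by omega), if_pos hle]
      obtain ⟨j, rfl⟩ : ∃ j, i = j + 2 := ⟨i - 2, by omega⟩
      simp only [List.getElem_cons_succ, Option.getD_some]
      rw [List.getElem_map, PySem.List.getElem_pyRange_one]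
      congr 1
      omega

-- ===== VERDICT (by name: the statement is the Claim_ definition above) =====
theorem min_prime_factor_spec : Claim_equal_min_prime_factor := by
  intro n _ hpre
  unfold Spec_min_prime_factor
  rw [a_eq_ref n hpre, alt_eq_ref n hpre]
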